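-- pv_equiv track=rewrite | github.com/Marimuda/maritime-trajectory-prediction | script.py | map_to_empty_files
-- ===== SOURCE A (Python) =====
-- def map_to_empty_files(py_blocks, yaml_blocks, empty_files):
--     """Match extracted code blocks to empty files that need to be filled."""
--     empty_file_map = {}
--
--     for empty_file in empty_files:
--         base_name = empty_file.split('/')[-1]
--         # Skip __init__.py files
--         if base_name == "__init__.py":
--             continue
--
--         matches = []
--
--         # For Python files
--         if base_name.endswith('.py'):
--             for file_name, line_num, code, _ in py_blocks:
--                 if base_name == file_name or base_name in file_name or file_name in empty_file:
--                     matches.append((file_name, line_num, code))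
--
--         # For YAML files
--         elif base_name.endswith('.yaml'):
--             for file_name, line_num, yaml_content in yaml_blocks:
--                 if base_name == file_name or base_name in file_name or file_name in empty_file:
--                     matches.append((file_name, line_num, yaml_content))
--
--         if matches:
--             # Sort by line number (descending) to get the latest version
--             matches.sort(key=lambda x: x[1], reverse=True)
--             empty_file_map[empty_file] = matches[0]
--
--     return empty_file_map
-- ===== SOURCE B (Python) =====
-- def _base(path):
--     return path.split('/')[-1]
--
--
-- def map_to_empty_files(py_blocks, yaml_blocks, empty_files):
--     """Match extracted code blocks to empty files that need to be filled.
--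
--     Inverted loop structure: instead of scanning all blocks once per empty
--     file (collect, sort descending, take first), first index the target
--     files by kind, then make ONE pass over each block list, pushing every
--     block to all targets it matches and keeping per target the running best
--     (strictly greater line number wins, so the first-seen block among ties
--     is kept, exactly like the head of A's stable reverse sort)."""
--     py_targets = {f: _base(f)
--                   for f in empty_files
--                   if _base(f) != "__init__.py" and _base(f).endswith('.py')}
--     yaml_targets = {f: _base(f)
--                     for f in empty_files
--                     if _base(f) != "__init__.py"
--                     and not _base(f).endswith('.py')
--                     and _base(f).endswith('.yaml')}
--
--     best = {}
--     for file_name, line_num, code, _ in py_blocks: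
--         for f, base in py_targets.items():
--             if base == file_name or base in file_name or file_name in f:
--                 cur = best.get(f)
--                 if cur is None or cur[1] < line_num:
--                     best[f] = (file_name, line_num, code)
--     for file_name, line_num, content in yaml_blocks:
--         for f, base in yaml_targets.items():
--             if base == file_name or base in file_name or file_name in f:
--                 cur = best.get(f)
--                 if cur is None or cur[1] < line_num:
--                     best[f] = (file_name, line_num, content)
--
--     return {f: best[f] for f in empty_files if f in best}
-- ===== Notes on version B (the rewrite author's own statement) =====
-- stated objective: alternative
-- what changed: A loops over empty files and, for each, scans all blocks, collects matches, sorts them descending by line and takes the head; B inverts the loops: it first indexes the non-__init__ target files by kind (.py/.yaml) into dicts, then makes a single pass over each block list, updating a per-target running best (strict < so the first-seen block among equal line numbers is kept, matching the stable reverse sort), and finally assembles the result in empty_files order.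
import Mathlib
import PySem

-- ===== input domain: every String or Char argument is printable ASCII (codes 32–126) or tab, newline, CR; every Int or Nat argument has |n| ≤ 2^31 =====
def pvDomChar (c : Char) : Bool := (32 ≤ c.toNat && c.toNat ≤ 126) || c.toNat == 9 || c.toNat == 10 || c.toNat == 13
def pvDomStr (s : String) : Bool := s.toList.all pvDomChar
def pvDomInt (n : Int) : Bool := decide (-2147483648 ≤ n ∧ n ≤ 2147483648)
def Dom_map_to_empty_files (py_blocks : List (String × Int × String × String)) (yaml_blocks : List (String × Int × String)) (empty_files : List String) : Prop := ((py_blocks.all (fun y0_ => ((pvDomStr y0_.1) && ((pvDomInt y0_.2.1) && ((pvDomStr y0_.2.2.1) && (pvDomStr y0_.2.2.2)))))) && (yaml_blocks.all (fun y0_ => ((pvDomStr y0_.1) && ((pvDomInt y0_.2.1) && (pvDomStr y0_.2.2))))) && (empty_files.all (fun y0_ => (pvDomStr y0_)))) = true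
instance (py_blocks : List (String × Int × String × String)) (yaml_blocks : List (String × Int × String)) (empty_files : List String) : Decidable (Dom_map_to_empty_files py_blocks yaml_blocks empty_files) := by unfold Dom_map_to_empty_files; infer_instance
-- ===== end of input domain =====

-- B inverts A's loop structure: it indexes the target files by kind first, then makes one
-- pass over each block list maintaining a per-target running best; objective: alternative.

-- ===== PORT A =====
-- s.split("/") — split? is total here since the separator is nonempty (exact)
def pvSplitSlash (s : String) : List String := (PySem.Str.split? s "/").getD []
-- path.split('/')[-1] (total: split of a nonempty separator is nonempty)
def pvBase (s : String) : String := PySem.List.pyGetD (pvSplitSlash s) (-1) ""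

def map_to_empty_files (py_blocks : List (String × Int × String × String)) (yaml_blocks : List (String × Int × String)) (empty_files : List String) : List (String × String × Int × String) :=
  (empty_files.foldl (fun (d : PySem.Dict String (String × Int × String)) empty_file =>
    let base_name := pvBase empty_file
    if base_name == "__init__.py" then d
    else
      let ms : List (String × Int × String) :=
        if PySem.Str.endswith base_name ".py" then
          py_blocks.foldl (fun acc b =>
            if base_name == b.1 || PySem.Str.isIn base_name b.1 || PySem.Str.isIn b.1 empty_file
            then acc ++ [(b.1, b.2.1, b.2.2.1)] else acc) []
        else if PySem.Str.endswith base_name ".yaml" then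
          yaml_blocks.foldl (fun acc b =>
            if base_name == b.1 || PySem.Str.isIn base_name b.1 || PySem.Str.isIn b.1 empty_file
            then acc ++ [b] else acc) []
        else []
      match (PySem.List.sorted ms (fun x => x.2.1) true).head? with
      | some m => d.insert empty_file m
      | none => d) PySem.Dict.empty).items

-- ===== PORT B =====
def map_to_empty_files_alt (py_blocks : List (String × Int × String × String)) (yaml_blocks : List (String × Int × String)) (empty_files : List String) : List (String × String × Int × String) :=
  let py_targets : PySem.Dict String String :=
    empty_files.foldl (fun d f =>
      if pvBase f != "__init__.py" && PySem.Str.endswith (pvBase f) ".py"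
      then d.insert f (pvBase f) else d) PySem.Dict.empty
  let yaml_targets : PySem.Dict String String :=
    empty_files.foldl (fun d f =>
      if pvBase f != "__init__.py" && !PySem.Str.endswith (pvBase f) ".py"
         && PySem.Str.endswith (pvBase f) ".yaml"
      then d.insert f (pvBase f) else d) PySem.Dict.empty
  let best0 : PySem.Dict String (String × Int × String) :=
    py_blocks.foldl (fun bd b =>
      py_targets.items.foldl (fun bd t =>
        if t.2 == b.1 || PySem.Str.isIn t.2 b.1 || PySem.Str.isIn b.1 t.1 then
          match bd.get? t.1 with
          | none => bd.insert t.1 (b.1, b.2.1, b.2.2.1)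
          | some cur => if cur.2.1 < b.2.1 then bd.insert t.1 (b.1, b.2.1, b.2.2.1) else bd
        else bd) bd) PySem.Dict.empty
  let best : PySem.Dict String (String × Int × String) :=
    yaml_blocks.foldl (fun bd b =>
      yaml_targets.items.foldl (fun bd t =>
        if t.2 == b.1 || PySem.Str.isIn t.2 b.1 || PySem.Str.isIn b.1 t.1 then
          match bd.get? t.1 with
          | none => bd.insert t.1 b
          | some cur => if cur.2.1 < b.2.1 then bd.insert t.1 b else bd
        else bd) bd) best0
  (empty_files.foldl (fun (d : PySem.Dict String (String × Int × String)) f =>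
    match best.get? f with
    | some m => d.insert f m
    | none => d) PySem.Dict.empty).items

-- ===== PRECONDITION & SPEC =====
def Spec_map_to_empty_files (py_blocks : List (String × Int × String × String)) (yaml_blocks : List (String × Int × String)) (empty_files : List String) (out : List (String × String × Int × String)) : Prop := out = map_to_empty_files_alt py_blocks yaml_blocks empty_files
instance (py_blocks : List (String × Int × String × String)) (yaml_blocks : List (String × Int × String)) (empty_files : List String) (out : List (String × String × Int × String)) : Decidable (Spec_map_to_empty_files py_blocks yaml_blocks empty_files out) := by unfold Spec_map_to_empty_files; infer_instance

-- ===== CLAIM (what is proved, stated in full; the proofs are below) =====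
def Claim_equal_map_to_empty_files : Prop := ∀ (py_blocks : List (String × Int × String × String)) (yaml_blocks : List (String × Int × String)) (empty_files : List String), Dom_map_to_empty_files py_blocks yaml_blocks empty_files → Spec_map_to_empty_files py_blocks yaml_blocks empty_files (map_to_empty_files py_blocks yaml_blocks empty_files)

-- ===== LEMMAS AND PROOFS =====

-- head of insertBy: x goes in front iff `before x` holds of the old head
theorem head?_insertBy {α : Type} (before : α → α → Bool) (x : α) (acc : List α) :
    (PySem.List.insertBy before x acc).head? =
      match acc.head? with
      | none => some x
      | some y => if before x y then some x else some y := by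
  cases acc with
  | nil => simp [PySem.List.insertBy]
  | cons y ys => simp only [PySem.List.insertBy, List.head?]; split_ifs <;> simp

-- the head of an insertion-sort fold evolves exactly like a first-max fold
theorem head?_foldl_insertBy {α : Type} (key : α → Int) (xs : List α) : ∀ (acc : List α),
    (xs.foldl (fun acc x => PySem.List.insertBy (fun a b => decide (key b < key a)) x acc) acc).head? =
    xs.foldl (fun o x => match o with
      | none => some x
      | some m => if key m < key x then some x else some m) acc.head? := by
  induction xs with
  | nil => intro acc; rfl
  | cons x xs ih =>
    intro acc
    simp only [List.foldl_cons]
    rw [ih, head?_insertBy]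
    cases acc.head? <;> simp

-- head of the stable reverse sort = Python's max (first element with maximal key)
theorem head?_sorted_rev_eq_max? {α : Type} (xs : List α) (key : α → Int) :
    (PySem.List.sorted xs key true).head? = PySem.List.max? xs key := by
  simp only [PySem.List.sorted, PySem.List.max?]
  exact head?_foldl_insertBy key xs []

-- the running first-max step (shared between the lemma statements below)
def pvRunMax (o : Option (String × Int × String)) (x : String × Int × String) :
    Option (String × Int × String) :=
  match o with
  | none => some x
  | some m => if m.2.1 < x.2.1 then some x else some m

-- Python's max over a list is the running first-max fold
theorem max?_eq_foldl (xs : List (String × Int × String)) :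
    PySem.List.max? xs (fun x => x.2.1) = xs.foldl pvRunMax none := by
  simp only [PySem.List.max?]
  congr 1
  funext o x
  cases o <;> rfl

-- lookup after a conditional-insert fold (the target-index builders)
theorem get?_foldl_insert_if (p : String → Bool) (g : String → String) :
    ∀ (fs : List String) (d : PySem.Dict String String) (f : String),
    (fs.foldl (fun d x => if p x then d.insert x (g x) else d) d).get? f
      = if f ∈ fs ∧ p f = true then some (g f) else d.get? f := by
  intro fs
  induction fs with
  | nil => intro d f; simp
  | cons x fs ih =>
    intro d f
    rw [List.foldl_cons, ih]
    by_cases hmem : f ∈ fs ∧ p f = true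
    · simp [hmem, List.mem_cons]
    · simp only [hmem, if_false]
      by_cases hfx : f = x
      · subst hfx
        by_cases hp : p f = true
        · simp [hp, hmem, PySem.Dict.get?_insert_self]
        · simp [hp, hmem]
      · by_cases hp : p x = true
        · simp [hp, PySem.Dict.get?_insert_of_ne _ _ hfx, hfx, hmem]
        · have hnot : ¬(f ∈ x :: fs ∧ p f = true) := by
            simp only [List.mem_cons]; tauto
          simp [hp, hnot]
          intro h1 h2
          exact absurd ⟨h1.resolve_left hfx, h2⟩ hmem

-- keys stay nodup through a conditional-insert fold
theorem nodup_keys_foldl_insert_if (p : String → Bool) (g : String → String) :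
    ∀ (fs : List String) (d : PySem.Dict String String), d.keys.Nodup →
    (fs.foldl (fun d x => if p x then d.insert x (g x) else d) d).keys.Nodup := by
  intro fs
  induction fs with
  | nil => intro d h; simpa using h
  | cons x fs ih =>
    intro d h
    rw [List.foldl_cons]
    apply ih
    by_cases hp : p x = true
    · simpa [hp] using PySem.Dict.nodup_keys_insert d x (g x) h
    · simpa [hp] using h

-- the per-block inner fold over the target items, viewed at one key f:
-- (a) f not a key of the target index: nothing changes
theorem get?_inner_not_mem (q : String × String → Bool) (val : String × Int × String) (lv : Int) :
    ∀ (ts : List (String × String)) (bd : PySem.Dict String (String × Int × String)) (f : String),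
    f ∉ ts.map Prod.fst →
    (ts.foldl (fun bd t =>
        if q t then
          match bd.get? t.1 with
          | none => bd.insert t.1 val
          | some cur => if cur.2.1 < lv then bd.insert t.1 val else bd
        else bd) bd).get? f = bd.get? f := by
  intro ts
  induction ts with
  | nil => intro bd f _; rfl
  | cons t ts ih =>
    intro bd f hf
    simp only [List.map_cons, List.mem_cons, not_or] at hf
    rw [List.foldl_cons, ih _ _ hf.2]
    by_cases hq : q t = true
    · simp only [hq, if_true]
      cases h : bd.get? t.1 with
      | none => exact PySem.Dict.get?_insert_of_ne _ _ hf.1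
      | some cur =>
        by_cases hlt : cur.2.1 < lv
        · simp only [hlt, if_true]; exact PySem.Dict.get?_insert_of_ne _ _ hf.1
        · simp [hlt]
    · simp [hq]

-- (b) (f, v) is in the target items (keys nodup): exactly one conditional best-update happens
theorem get?_inner_mem (q : String × String → Bool) (val : String × Int × String) (lv : Int) :
    ∀ (ts : List (String × String)) (bd : PySem.Dict String (String × Int × String))
      (f : String) (v : String),
    (ts.map Prod.fst).Nodup → (f, v) ∈ ts →
    (ts.foldl (fun bd t =>
        if q t then
          match bd.get? t.1 with
          | none => bd.insert t.1 val
          | some cur => if cur.2.1 < lv then bd.insert t.1 val else bd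
        else bd) bd).get? f
      = if q (f, v) then
          match bd.get? f with
          | none => some val
          | some cur => if cur.2.1 < lv then some val else some cur
        else bd.get? f := by
  intro ts
  induction ts with
  | nil => intro bd f v _ h; simp at h
  | cons t ts ih =>
    intro bd f v hnd hmem
    simp only [List.map_cons, List.nodup_cons] at hnd
    rcases List.mem_cons.mp hmem with heq | htail
    · subst heq
      have hf : f ∉ ts.map Prod.fst := hnd.1
      rw [List.foldl_cons, get?_inner_not_mem q val lv ts _ f hf]
      by_cases hq : q (f, v) = true
      · simp only [hq, if_true]
        cases h : bd.get? f with
        | none => simp [h, PySem.Dict.get?_insert_self]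
        | some cur =>
          by_cases hlt : cur.2.1 < lv
          · simp [h, hlt, PySem.Dict.get?_insert_self]
          · simp [h, hlt]
      · simp [hq]
    · have hne : f ≠ t.1 := by
        intro h
        exact hnd.1 (h ▸ List.mem_map_of_mem (f := Prod.fst) htail)
      rw [List.foldl_cons]
      have hstep : (if q t then
          match bd.get? t.1 with
          | none => bd.insert t.1 val
          | some cur => if cur.2.1 < lv then bd.insert t.1 val else bd
        else bd).get? f = bd.get? f := by
        by_cases hq : q t = true
        · simp only [hq, if_true]
          cases h : bd.get? t.1 with
          | none => exact PySem.Dict.get?_insert_of_ne _ _ hne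
          | some cur =>
            by_cases hlt : cur.2.1 < lv
            · simp only [hlt, if_true]; exact PySem.Dict.get?_insert_of_ne _ _ hne
            · simp [hlt]
        · simp [hq]
      rw [ih _ f v hnd.2 htail]
      rw [hstep]

-- the whole block pass, viewed at a key f that is not in the target index: no effect
theorem get?_outer_not_mem {B : Type} (q : B → String × String → Bool)
    (val : B → String × Int × String) (lv : B → Int) (ts : List (String × String)) (f : String)
    (hf : f ∉ ts.map Prod.fst) :
    ∀ (blocks : List B) (bd : PySem.Dict String (String × Int × String)),
    (blocks.foldl (fun bd b => ts.foldl (fun bd t =>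
        if q b t then
          match bd.get? t.1 with
          | none => bd.insert t.1 (val b)
          | some cur => if cur.2.1 < lv b then bd.insert t.1 (val b) else bd
        else bd) bd) bd).get? f = bd.get? f := by
  intro blocks
  induction blocks with
  | nil => intro bd; rfl
  | cons b blocks ih =>
    intro bd
    rw [List.foldl_cons, ih, get?_inner_not_mem (q b) (val b) (lv b) ts bd f hf]

-- the whole block pass, viewed at an indexed key f: the running-best Option fold
theorem get?_outer_mem {B : Type} (q : B → String × String → Bool)
    (val : B → String × Int × String) (lv : B → Int) (ts : List (String × String)) (f v : String)
    (hnd : (ts.map Prod.fst).Nodup) (hmem : (f, v) ∈ ts) :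
    ∀ (blocks : List B) (bd : PySem.Dict String (String × Int × String)),
    (blocks.foldl (fun bd b => ts.foldl (fun bd t =>
        if q b t then
          match bd.get? t.1 with
          | none => bd.insert t.1 (val b)
          | some cur => if cur.2.1 < lv b then bd.insert t.1 (val b) else bd
        else bd) bd) bd).get? f
      = blocks.foldl (fun o b =>
          if q b (f, v) then
            match o with
            | none => some (val b)
            | some cur => if cur.2.1 < lv b then some (val b) else some cur
          else o) (bd.get? f) := by
  intro blocks
  induction blocks with
  | nil => intro bd; rfl
  | cons b blocks ih =>
    intro bd
    rw [List.foldl_cons, ih, get?_inner_mem (q b) (val b) (lv b) ts bd f v hnd hmem, List.foldl_cons]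

-- a guarded first-max Option fold is the first-max fold of the filtered, mapped list
theorem foldl_optmax {B : Type} (q : B → Bool) (g : B → String × Int × String)
    (lv : B → Int) (hl : ∀ b, (g b).2.1 = lv b) :
    ∀ (xs : List B) (o : Option (String × Int × String)),
    xs.foldl (fun o b =>
        if q b then
          match o with
          | none => some (g b)
          | some cur => if cur.2.1 < lv b then some (g b) else some cur
        else o) o
      = ((xs.filter q).map g).foldl pvRunMax o := by
  intro xs
  induction xs with
  | nil => intro o; rfl
  | cons x xs ih =>
    intro o
    by_cases hq : q x = true
    · have hinit : (match o with
          | none => some (g x)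
          | some cur => if cur.2.1 < lv x then some (g x) else some cur) = pvRunMax o (g x) := by
        cases o <;> simp [pvRunMax, hl]
      rw [List.foldl_cons, if_pos hq, hinit, ih, List.filter_cons_of_pos hq, List.map_cons,
        List.foldl_cons]
    · rw [List.foldl_cons, if_neg hq, ih, List.filter_cons_of_neg hq]

-- items are keyed by the first component: d.items.map Prod.fst = d.keys
theorem pv_map_fst_items {κ ν : Type} [BEq κ] (d : PySem.Dict κ ν) :
    d.items.map Prod.fst = d.keys := rfl

-- ===== VERDICT (by name: the statement is the Claim_ definition above) =====
set_option maxHeartbeats 1000000 in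
theorem map_to_empty_files_spec : Claim_equal_map_to_empty_files := by
  intro py_blocks yaml_blocks empty_files _
  unfold Spec_map_to_empty_files
  simp only [map_to_empty_files, map_to_empty_files_alt]
  congr 1
  apply PySem.List.foldl_congr_mem
  intro d f hf
  -- the two target indexes and their lookups at f
  set pT : PySem.Dict String String := empty_files.foldl (fun d f =>
      if pvBase f != "__init__.py" && PySem.Str.endswith (pvBase f) ".py"
      then d.insert f (pvBase f) else d) PySem.Dict.empty with hpTdef
  set yT : PySem.Dict String String := empty_files.foldl (fun d f =>
      if pvBase f != "__init__.py" && !PySem.Str.endswith (pvBase f) ".py"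
         && PySem.Str.endswith (pvBase f) ".yaml"
      then d.insert f (pvBase f) else d) PySem.Dict.empty with hyTdef
  have hpT : pT.get? f = if f ∈ empty_files ∧
      (pvBase f != "__init__.py" && PySem.Str.endswith (pvBase f) ".py") = true
      then some (pvBase f) else none := by
    rw [hpTdef, get?_foldl_insert_if (fun f =>
      pvBase f != "__init__.py" && PySem.Str.endswith (pvBase f) ".py")
      (fun f => pvBase f) empty_files PySem.Dict.empty f, PySem.Dict.get?_empty]
  have hyT : yT.get? f = if f ∈ empty_files ∧
      (pvBase f != "__init__.py" && !PySem.Str.endswith (pvBase f) ".py"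
        && PySem.Str.endswith (pvBase f) ".yaml") = true
      then some (pvBase f) else none := by
    rw [hyTdef, get?_foldl_insert_if (fun f =>
      pvBase f != "__init__.py" && !PySem.Str.endswith (pvBase f) ".py"
        && PySem.Str.endswith (pvBase f) ".yaml")
      (fun f => pvBase f) empty_files PySem.Dict.empty f, PySem.Dict.get?_empty]
  have hpnd : (pT.items.map Prod.fst).Nodup := by
    rw [pv_map_fst_items]
    exact nodup_keys_foldl_insert_if _ _ empty_files _ PySem.Dict.nodup_keys_empty
  have hynd : (yT.items.map Prod.fst).Nodup := by
    rw [pv_map_fst_items]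
    exact nodup_keys_foldl_insert_if _ _ empty_files _ PySem.Dict.nodup_keys_empty
  by_cases hinit : (pvBase f == "__init__.py") = true
  · -- __init__.py: A skips; f is in neither index, so B's best has no entry for f
    have hbne : (pvBase f != "__init__.py") = false := by simp [bne, hinit]
    have hp0 : pT.get? f = none := by
      rw [hpT, if_neg]; rintro ⟨-, hc⟩; rw [hbne] at hc; simp at hc
    have hy0 : yT.get? f = none := by
      rw [hyT, if_neg]; rintro ⟨-, hc⟩; rw [hbne] at hc; simp at hc
    have hpnm : f ∉ pT.items.map Prod.fst := by
      rw [pv_map_fst_items]; exact (PySem.Dict.get?_eq_none_iff_not_mem_keys pT f).mp hp0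
    have hynm : f ∉ yT.items.map Prod.fst := by
      rw [pv_map_fst_items]; exact (PySem.Dict.get?_eq_none_iff_not_mem_keys yT f).mp hy0
    have h1 : (py_blocks.foldl (fun bd b => pT.items.foldl (fun bd t =>
        if t.2 == b.1 || PySem.Str.isIn t.2 b.1 || PySem.Str.isIn b.1 t.1 then
          match bd.get? t.1 with
          | none => bd.insert t.1 (b.1, b.2.1, b.2.2.1)
          | some cur => if cur.2.1 < b.2.1 then bd.insert t.1 (b.1, b.2.1, b.2.2.1) else bd
        else bd) bd) PySem.Dict.empty).get? f = PySem.Dict.empty.get? f :=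
      get?_outer_not_mem
        (fun b t => t.2 == b.1 || PySem.Str.isIn t.2 b.1 || PySem.Str.isIn b.1 t.1)
        (fun b => (b.1, b.2.1, b.2.2.1)) (fun b => b.2.1) pT.items f hpnm py_blocks PySem.Dict.empty
    have h2 : ∀ bd0 : PySem.Dict String (String × Int × String),
        (yaml_blocks.foldl (fun bd b => yT.items.foldl (fun bd t =>
        if t.2 == b.1 || PySem.Str.isIn t.2 b.1 || PySem.Str.isIn b.1 t.1 then
          match bd.get? t.1 with
          | none => bd.insert t.1 b
          | some cur => if cur.2.1 < b.2.1 then bd.insert t.1 b else bd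
        else bd) bd) bd0).get? f = bd0.get? f :=
      fun bd0 => get?_outer_not_mem
        (fun b t => t.2 == b.1 || PySem.Str.isIn t.2 b.1 || PySem.Str.isIn b.1 t.1)
        (fun b => b) (fun b => b.2.1) yT.items f hynm yaml_blocks bd0
    rw [if_pos hinit, h2, h1, PySem.Dict.get?_empty]
  · -- not __init__.py
    have hbne : (pvBase f != "__init__.py") = true := by simp [bne, hinit]
    rw [if_neg hinit]
    by_cases hpy : PySem.Str.endswith (pvBase f) ".py" = true
    · -- a .py target: f is in the py index only
      have hps : pT.get? f = some (pvBase f) := by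
        rw [hpT, if_pos]; exact ⟨hf, by rw [hbne, hpy]; rfl⟩
      have hy0 : yT.get? f = none := by
        rw [hyT, if_neg]; rintro ⟨-, hc⟩; rw [hpy] at hc; simp at hc
      have hmem : (f, pvBase f) ∈ pT.items := PySem.Dict.mem_items_of_get?_eq_some pT hps
      have hynm : f ∉ yT.items.map Prod.fst := by
        rw [pv_map_fst_items]; exact (PySem.Dict.get?_eq_none_iff_not_mem_keys yT f).mp hy0
      have h1 : (py_blocks.foldl (fun bd b => pT.items.foldl (fun bd t =>
          if t.2 == b.1 || PySem.Str.isIn t.2 b.1 || PySem.Str.isIn b.1 t.1 then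
            match bd.get? t.1 with
            | none => bd.insert t.1 (b.1, b.2.1, b.2.2.1)
            | some cur => if cur.2.1 < b.2.1 then bd.insert t.1 (b.1, b.2.1, b.2.2.1) else bd
          else bd) bd) PySem.Dict.empty).get? f
          = py_blocks.foldl (fun o b =>
              if pvBase f == b.1 || PySem.Str.isIn (pvBase f) b.1 || PySem.Str.isIn b.1 f then
                match o with
                | none => some (b.1, b.2.1, b.2.2.1)
                | some cur => if cur.2.1 < b.2.1 then some (b.1, b.2.1, b.2.2.1) else some cur
              else o) (PySem.Dict.empty.get? f) :=
        get?_outer_mem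
          (fun b t => t.2 == b.1 || PySem.Str.isIn t.2 b.1 || PySem.Str.isIn b.1 t.1)
          (fun b => (b.1, b.2.1, b.2.2.1)) (fun b => b.2.1) pT.items f (pvBase f) hpnd hmem py_blocks
          PySem.Dict.empty
      have h2 : ∀ bd0 : PySem.Dict String (String × Int × String),
          (yaml_blocks.foldl (fun bd b => yT.items.foldl (fun bd t =>
          if t.2 == b.1 || PySem.Str.isIn t.2 b.1 || PySem.Str.isIn b.1 t.1 then
            match bd.get? t.1 with
            | none => bd.insert t.1 b
            | some cur => if cur.2.1 < b.2.1 then bd.insert t.1 b else bd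
          else bd) bd) bd0).get? f = bd0.get? f :=
        fun bd0 => get?_outer_not_mem
          (fun b t => t.2 == b.1 || PySem.Str.isIn t.2 b.1 || PySem.Str.isIn b.1 t.1)
          (fun b => b) (fun b => b.2.1) yT.items f hynm yaml_blocks bd0
      have h3 : py_blocks.foldl (fun o b =>
            if pvBase f == b.1 || PySem.Str.isIn (pvBase f) b.1 || PySem.Str.isIn b.1 f then
              match o with
              | none => some (b.1, b.2.1, b.2.2.1)
              | some cur => if cur.2.1 < b.2.1 then some (b.1, b.2.1, b.2.2.1) else some cur
            else o) none
          = PySem.List.max? ((py_blocks.filter (fun b =>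
              pvBase f == b.1 || PySem.Str.isIn (pvBase f) b.1 || PySem.Str.isIn b.1 f)).map
              (fun b => (b.1, b.2.1, b.2.2.1))) (fun x => x.2.1) := by
        rw [max?_eq_foldl]
        exact foldl_optmax
          (fun b => pvBase f == b.1 || PySem.Str.isIn (pvBase f) b.1 || PySem.Str.isIn b.1 f)
          (fun b => (b.1, b.2.1, b.2.2.1)) (fun b => b.2.1) (fun b => rfl) py_blocks none
      rw [if_pos hpy, head?_sorted_rev_eq_max?, PySem.List.foldl_append_if, List.nil_append,
        h2, h1, PySem.Dict.get?_empty, h3]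
    · rw [if_neg hpy]
      have hpyf : PySem.Str.endswith (pvBase f) ".py" = false := Bool.eq_false_iff.mpr hpy
      have hp0 : pT.get? f = none := by
        rw [hpT, if_neg]; rintro ⟨-, hc⟩; rw [hpyf] at hc; simp at hc
      have hpnm : f ∉ pT.items.map Prod.fst := by
        rw [pv_map_fst_items]; exact (PySem.Dict.get?_eq_none_iff_not_mem_keys pT f).mp hp0
      have h1 : ∀ bd0 : PySem.Dict String (String × Int × String),
          (py_blocks.foldl (fun bd b => pT.items.foldl (fun bd t =>
          if t.2 == b.1 || PySem.Str.isIn t.2 b.1 || PySem.Str.isIn b.1 t.1 then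
            match bd.get? t.1 with
            | none => bd.insert t.1 (b.1, b.2.1, b.2.2.1)
            | some cur => if cur.2.1 < b.2.1 then bd.insert t.1 (b.1, b.2.1, b.2.2.1) else bd
          else bd) bd) bd0).get? f = bd0.get? f :=
        fun bd0 => get?_outer_not_mem
          (fun b t => t.2 == b.1 || PySem.Str.isIn t.2 b.1 || PySem.Str.isIn b.1 t.1)
          (fun b => (b.1, b.2.1, b.2.2.1)) (fun b => b.2.1) pT.items f hpnm py_blocks bd0
      by_cases hyaml : PySem.Str.endswith (pvBase f) ".yaml" = true
      · -- a .yaml target: f is in the yaml index only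
        have hys : yT.get? f = some (pvBase f) := by
          rw [hyT, if_pos]; exact ⟨hf, by rw [hbne, hpyf, hyaml]; rfl⟩
        have hmem : (f, pvBase f) ∈ yT.items := PySem.Dict.mem_items_of_get?_eq_some yT hys
        have h2 : (yaml_blocks.foldl (fun bd b => yT.items.foldl (fun bd t =>
            if t.2 == b.1 || PySem.Str.isIn t.2 b.1 || PySem.Str.isIn b.1 t.1 then
              match bd.get? t.1 with
              | none => bd.insert t.1 b
              | some cur => if cur.2.1 < b.2.1 then bd.insert t.1 b else bd
            else bd) bd) (py_blocks.foldl (fun bd b => pT.items.foldl (fun bd t =>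
            if t.2 == b.1 || PySem.Str.isIn t.2 b.1 || PySem.Str.isIn b.1 t.1 then
              match bd.get? t.1 with
              | none => bd.insert t.1 (b.1, b.2.1, b.2.2.1)
              | some cur => if cur.2.1 < b.2.1 then bd.insert t.1 (b.1, b.2.1, b.2.2.1) else bd
            else bd) bd) PySem.Dict.empty)).get? f
            = yaml_blocks.foldl (fun o b =>
                if pvBase f == b.1 || PySem.Str.isIn (pvBase f) b.1 || PySem.Str.isIn b.1 f then
                  match o with
                  | none => some b
                  | some cur => if cur.2.1 < b.2.1 then some b else some cur
                else o) ((py_blocks.foldl (fun bd b => pT.items.foldl (fun bd t =>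
            if t.2 == b.1 || PySem.Str.isIn t.2 b.1 || PySem.Str.isIn b.1 t.1 then
              match bd.get? t.1 with
              | none => bd.insert t.1 (b.1, b.2.1, b.2.2.1)
              | some cur => if cur.2.1 < b.2.1 then bd.insert t.1 (b.1, b.2.1, b.2.2.1) else bd
            else bd) bd) PySem.Dict.empty).get? f) :=
          get?_outer_mem
            (fun b t => t.2 == b.1 || PySem.Str.isIn t.2 b.1 || PySem.Str.isIn b.1 t.1)
            (fun b => b) (fun b => b.2.1) yT.items f (pvBase f) hynd hmem yaml_blocks _
        have h3 : yaml_blocks.foldl (fun o b =>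
              if pvBase f == b.1 || PySem.Str.isIn (pvBase f) b.1 || PySem.Str.isIn b.1 f then
                match o with
                | none => some b
                | some cur => if cur.2.1 < b.2.1 then some b else some cur
              else o) none
            = PySem.List.max? ((yaml_blocks.filter (fun b =>
                pvBase f == b.1 || PySem.Str.isIn (pvBase f) b.1 || PySem.Str.isIn b.1 f)).map
                (fun b => b)) (fun x => x.2.1) := by
          rw [max?_eq_foldl]
          exact foldl_optmax
            (fun b => pvBase f == b.1 || PySem.Str.isIn (pvBase f) b.1 || PySem.Str.isIn b.1 f)
            (fun b => b) (fun b => b.2.1) (fun b => rfl) yaml_blocks none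
        rw [if_pos hyaml, head?_sorted_rev_eq_max?, PySem.List.foldl_append_if,
          List.nil_append, h2, h1, PySem.Dict.get?_empty, h3]
      · -- neither suffix: A collects nothing, f is in neither index
        have hyamlf : PySem.Str.endswith (pvBase f) ".yaml" = false := Bool.eq_false_iff.mpr hyaml
        have hy0 : yT.get? f = none := by
          rw [hyT, if_neg]; rintro ⟨-, hc⟩; rw [hyamlf] at hc; simp at hc
        have hynm : f ∉ yT.items.map Prod.fst := by
          rw [pv_map_fst_items]; exact (PySem.Dict.get?_eq_none_iff_not_mem_keys yT f).mp hy0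
        have h2 : ∀ bd0 : PySem.Dict String (String × Int × String),
            (yaml_blocks.foldl (fun bd b => yT.items.foldl (fun bd t =>
            if t.2 == b.1 || PySem.Str.isIn t.2 b.1 || PySem.Str.isIn b.1 t.1 then
              match bd.get? t.1 with
              | none => bd.insert t.1 b
              | some cur => if cur.2.1 < b.2.1 then bd.insert t.1 b else bd
            else bd) bd) bd0).get? f = bd0.get? f :=
          fun bd0 => get?_outer_not_mem
            (fun b t => t.2 == b.1 || PySem.Str.isIn t.2 b.1 || PySem.Str.isIn b.1 t.1)
            (fun b => b) (fun b => b.2.1) yT.items f hynm yaml_blocks bd0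
        rw [if_neg hyaml, h2, h1, PySem.Dict.get?_empty]
        rfl
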